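-- pv_equiv track=rewrite | github.com/marcelowsena/InsumoOrcamento | src/core/data_processor.py | _extrair_niveis_codigo_local
-- ===== SOURCE A (Python) =====
-- from typing import Dict, List, Optional, Tuple, Any
--
-- def _extrair_niveis_codigo_local(codigo_completo: str) -> List[str]:
--     if not codigo_completo:
--         return []
--
--     partes = codigo_completo.split('.')
--     niveis = []
--
--     for i in range(1, len(partes) + 1):
--         nivel = '.'.join(partes[:i])
--         niveis.append(nivel)
--
--     return niveis
-- ===== SOURCE B (Python) =====
-- from typing import List
--
-- def _extrair_niveis_codigo_local(codigo_completo: str) -> List[str]: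
--     if not codigo_completo:
--         return []
--     niveis = []
--     for i, ch in enumerate(codigo_completo):
--         if ch == '.':
--             niveis.append(codigo_completo[:i])
--     niveis.append(codigo_completo)
--     return niveis
-- ===== Notes on version B (the rewrite author's own statement) =====
-- stated objective: alternative
-- what changed: Instead of splitting on '.' and re-joining a growing slice of the parts list for each level, B scans the original string once and emits the prefix codigo_completo[:i] at every dot position, then the whole string; no split/join at all.
import Mathlib
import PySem

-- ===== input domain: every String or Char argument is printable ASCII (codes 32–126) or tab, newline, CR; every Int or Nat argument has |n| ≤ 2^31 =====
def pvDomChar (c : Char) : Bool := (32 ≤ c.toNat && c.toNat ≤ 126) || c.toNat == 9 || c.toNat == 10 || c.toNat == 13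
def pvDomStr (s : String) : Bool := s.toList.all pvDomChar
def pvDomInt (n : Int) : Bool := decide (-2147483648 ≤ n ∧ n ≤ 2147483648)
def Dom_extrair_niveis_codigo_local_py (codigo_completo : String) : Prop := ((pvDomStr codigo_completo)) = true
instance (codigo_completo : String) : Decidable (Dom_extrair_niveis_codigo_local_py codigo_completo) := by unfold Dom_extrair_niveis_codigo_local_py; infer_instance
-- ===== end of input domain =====

-- B builds the levels by scanning the string once and emitting the prefix before each '.',
-- then the whole string, instead of splitting on '.' and re-joining growing slices (alternative decomposition, same cost).


-- ===== PORT A =====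
-- partes = codigo_completo.split('.'); for i in range(1, len(partes)+1): niveis.append('.'.join(partes[:i]))
def extrair_niveis_codigo_local_py (codigo_completo : String) : List String :=
  if codigo_completo = "" then []
  else
    let partes : List String := (PySem.Chars.splitOn codigo_completo.toList ['.']).map String.ofList
    (PySem.List.pyRange 1 ((partes.length : Int) + 1) 1).foldl
      (fun niveis i =>
        niveis ++ [PySem.Str.join "." (PySem.List.slice partes none (some i))]) []

-- ===== PORT B =====
-- for i, ch in enumerate(codigo_completo): if ch == '.': niveis.append(codigo_completo[:i]); then niveis.append(codigo_completo)
def extrair_niveis_codigo_local_py_alt (codigo_completo : String) : List String :=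
  if codigo_completo = "" then []
  else
    let niveis : List String :=
      (PySem.List.enumerate codigo_completo.toList).foldl
        (fun acc p =>
          if p.2 = '.' then acc ++ [PySem.Str.slice codigo_completo none (some p.1)] else acc) []
    niveis ++ [codigo_completo]

-- ===== PRECONDITION & SPEC =====
def Spec_extrair_niveis_codigo_local_py (codigo_completo : String) (out : List String) : Prop := out = extrair_niveis_codigo_local_py_alt codigo_completo
instance (codigo_completo : String) (out : List String) : Decidable (Spec_extrair_niveis_codigo_local_py codigo_completo out) := by unfold Spec_extrair_niveis_codigo_local_py; infer_instance

-- ===== CLAIM (what is proved, stated in full; the proofs are below) =====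
def Claim_equal_extrair_niveis_codigo_local_py : Prop := ∀ (codigo_completo : String), Dom_extrair_niveis_codigo_local_py codigo_completo → Spec_extrair_niveis_codigo_local_py codigo_completo (extrair_niveis_codigo_local_py codigo_completo)

-- ===== LEMMAS AND PROOFS =====

-- structural version of str.split('.') (single-char separator), used only in the proofs
def pvSplitDot (pre : List Char) : List Char → List (List Char)
  | [] => [pre]
  | c :: rest => if c = '.' then pre :: pvSplitDot [] rest else pvSplitDot (pre ++ [c]) rest

-- the canonical levels: prefix before each dot, then the full string (relative to accumulated prefix `pre`)
def pvLevels (pre : List Char) : List Char → List (List Char)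
  | [] => [pre]
  | c :: rest => if c = '.' then pre :: pvLevels (pre ++ [c]) rest else pvLevels (pre ++ [c]) rest

lemma pvSplitDot_ne_nil (pre : List Char) (cs : List Char) : pvSplitDot pre cs ≠ [] := by
  induction cs generalizing pre with
  | nil => simp [pvSplitDot]
  | cons c rest ih => simp only [pvSplitDot]; split_ifs <;> simp [ih]

lemma pvLevels_ne_nil (pre : List Char) (cs : List Char) : pvLevels pre cs ≠ [] := by
  induction cs generalizing pre with
  | nil => simp [pvLevels]
  | cons c rest ih => simp only [pvLevels]; split_ifs <;> simp [ih]

lemma splitOn_go_eq (fuel : Nat) (l cur : List Char) (acc2 : List (List Char))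
    (h : l.length < fuel) :
    PySem.Chars.splitOn.go ['.'] fuel l cur acc2 = acc2.reverse ++ pvSplitDot cur.reverse l := by
  induction fuel generalizing l cur acc2 with
  | zero => omega
  | succ fuel ih =>
    cases l with
    | nil => simp [PySem.Chars.splitOn.go, pvSplitDot]
    | cons c rest =>
      simp only [PySem.Chars.splitOn.go]
      by_cases hc : c = '.'
      · subst hc
        rw [if_pos (by simp [List.isPrefixOf])]
        rw [ih _ _ _ (by simpa using Nat.lt_of_succ_lt_succ h)]
        simp [pvSplitDot]
      · rw [if_neg (by simp [List.isPrefixOf]; exact fun hh => hc hh.symm)]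
        rw [ih _ _ _ (by simpa using Nat.lt_of_succ_lt_succ (by simpa using h))]
        simp [pvSplitDot, hc]

lemma splitOn_eq_pvSplitDot (cs : List Char) :
    PySem.Chars.splitOn cs ['.'] = pvSplitDot [] cs := by
  have := splitOn_go_eq (cs.length + 1) cs [] [] (by omega)
  simpa [PySem.Chars.splitOn] using this

lemma pvLevels_append (cs : List Char) (a b : List Char) :
    pvLevels (a ++ b) cs = (pvLevels b cs).map (a ++ ·) := by
  induction cs generalizing b with
  | nil => simp [pvLevels]
  | cons c rest ih =>
    simp only [pvLevels]
    split_ifs with hc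
    · simp only [List.map_cons]
      rw [List.append_assoc, ih (b ++ [c])]
    · rw [List.append_assoc, ih (b ++ [c])]

lemma pvLevels_concat (cs : List Char) : ∀ pre,
    pvLevels pre cs = (pvLevels pre cs).dropLast ++ [pre ++ cs] := by
  induction cs with
  | nil => intro pre; simp [pvLevels]
  | cons c rest ih =>
    intro pre
    simp only [pvLevels]
    split_ifs with hc
    · have hne := pvLevels_ne_nil (pre ++ [c]) rest
      rw [List.dropLast_cons_of_ne_nil hne]
      have := ih (pre ++ [c])
      conv_lhs => rw [this]
      simp [hc]
    · have := ih (pre ++ [c])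
      conv_lhs => rw [this]
      simp

-- A-side: the '.'-joins of the growing takes of the split are exactly the levels
lemma joins_eq_pvLevels (cs : List Char) : ∀ pre,
    (List.range (pvSplitDot pre cs).length).map
        (fun k => PySem.Chars.join ['.'] ((pvSplitDot pre cs).take (k + 1)))
      = pvLevels pre cs := by
  induction cs with
  | nil =>
    intro pre
    simp [pvSplitDot, pvLevels, PySem.Chars.join_singleton]
  | cons c rest ih =>
    intro pre
    by_cases hc : c = '.'
    · subst hc
      simp only [pvSplitDot, pvLevels, if_true]
      obtain ⟨p0, P', hP⟩ : ∃ p0 P', pvSplitDot [] rest = p0 :: P' := by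
        cases h : pvSplitDot [] rest with
        | nil => exact absurd h (pvSplitDot_ne_nil [] rest)
        | cons a b => exact ⟨a, b, rfl⟩
      rw [hP]
      rw [List.length_cons, List.range_succ_eq_map]
      simp only [List.map_cons, List.map_map]
      rw [List.take_succ_cons, List.take_zero, PySem.Chars.join_singleton]
      have hrw : ∀ j : ℕ,
          PySem.Chars.join ['.'] ((pre :: p0 :: P').take (j + 1 + 1))
            = (pre ++ ['.']) ++ PySem.Chars.join ['.'] ((p0 :: P').take (j + 1)) := by
        intro j
        rw [List.take_succ_cons, List.take_succ_cons, PySem.Chars.join_cons_cons]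
      have := ih []
      rw [hP] at this
      have key : (List.range (p0 :: P').length).map
          ((fun x => PySem.Chars.join ['.'] ((pre :: p0 :: P').take (x + 1))) ∘ (· + 1))
          = (pvLevels [] rest).map ((pre ++ ['.']) ++ ·) := by
        rw [← this, List.map_map]
        apply List.map_congr_left
        intro j _
        simp only [Function.comp]
        exact hrw j
      rw [key]
      have : pre ++ ['.'] = (pre ++ ['.']) ++ [] := by simp
      rw [this, pvLevels_append]
      simp
    · simp only [pvSplitDot, pvLevels, if_neg hc]
      exact ih (pre ++ [c])

-- B-side: the enumerate fold collects the levels without the last one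
lemma enum_fold_eq (suffix : List Char) : ∀ (pre : List Char) (full : List Char)
    (_hfull : full = pre ++ suffix) (acc : List String),
    (PySem.List.enumerate suffix (pre.length : Int)).foldl
        (fun acc p =>
          if p.2 = '.' then
            acc ++ [PySem.Str.slice (String.ofList full) none (some p.1)]
          else acc) acc
      = acc ++ ((pvLevels pre suffix).dropLast.map String.ofList) := by
  induction suffix with
  | nil => intro pre full _ acc; simp [PySem.List.enumerate, pvLevels]
  | cons c rest ih =>
    intro pre full hfull acc
    have henum : PySem.List.enumerate (c :: rest) (pre.length : Int)
        = ((pre.length : Int), c) :: PySem.List.enumerate rest ((pre.length : Int) + 1) := by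
      simp [PySem.List.enumerate]
    rw [henum, List.foldl_cons]
    have hlen : ((pre.length : Int) + 1) = ((pre ++ [c]).length : Int) := by simp
    have hfull' : full = (pre ++ [c]) ++ rest := by simp [hfull]
    by_cases hc : c = '.'
    · rw [if_pos hc]
      have hslice : PySem.Str.slice (String.ofList full) none (some (pre.length : Int))
          = String.ofList pre := by
        subst hfull
        simp [PySem.Str.slice, PySem.List.slice_to_natCast]
      rw [hslice, hlen, ih (pre ++ [c]) full hfull']
      simp only [pvLevels, if_pos hc]
      rw [List.dropLast_cons_of_ne_nil (pvLevels_ne_nil _ _)]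
      simp
    · rw [if_neg hc, hlen, ih (pre ++ [c]) full hfull']
      simp [pvLevels, hc]

-- a foldl that only appends singletons is a map
lemma foldl_push {α β : Type} (f : α → β) (l : List α) (acc : List β) :
    l.foldl (fun acc x => acc ++ [f x]) acc = acc ++ l.map f := by
  induction l generalizing acc with
  | nil => simp
  | cons x rest ih => simp [ih]

-- A's port computes the levels (characterisation used by the verdict)
lemma portA_eq (s : String) (hs : ¬ s = "") :
    extrair_niveis_codigo_local_py s = (pvLevels [] s.toList).map String.ofList := by
  rw [extrair_niveis_codigo_local_py, if_neg hs]
  simp only [splitOn_eq_pvSplitDot]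
  set P := pvSplitDot [] s.toList with hP
  rw [PySem.List.pyRange_one, foldl_push]
  have hlen : (((P.map String.ofList).length : Int) + 1 - 1).toNat = P.length := by simp
  rw [hlen, List.nil_append]
  rw [← joins_eq_pvLevels s.toList []]
  rw [← hP]
  rw [List.map_map, List.map_map]
  apply List.map_congr_left
  intro k hk
  simp only [List.mem_range] at hk
  simp only [Function.comp]
  have hcast : (1 : Int) + (k : Int) = (((k + 1 : Nat)) : Int) := by push_cast; ring
  rw [hcast, PySem.List.slice_to_natCast]
  rw [← List.map_take]
  simp [PySem.Str.join, PySem.Chars.join, Function.comp_def]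

-- B's port computes the levels too
lemma portB_eq (s : String) (hs : ¬ s = "") :
    extrair_niveis_codigo_local_py_alt s = (pvLevels [] s.toList).map String.ofList := by
  rw [extrair_niveis_codigo_local_py_alt, if_neg hs]
  have hB := enum_fold_eq s.toList [] s.toList (by simp) []
  simp only [List.length_nil, Nat.cast_zero, String.ofList_toList] at hB
  simp only [hB, List.nil_append]
  conv_rhs => rw [pvLevels_concat s.toList []]
  simp

-- ===== VERDICT (by name: the statement is the Claim_ definition above) =====
theorem extrair_niveis_codigo_local_py_spec : Claim_equal_extrair_niveis_codigo_local_py := by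
  intro s _
  unfold Spec_extrair_niveis_codigo_local_py
  by_cases hs : s = ""
  · subst hs
    simp [extrair_niveis_codigo_local_py, extrair_niveis_codigo_local_py_alt]
  · rw [portA_eq s hs, portB_eq s hs]
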